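-- pv_equiv track=rewrite | github.com/nn1471521752/CS2DemoPlayer | src/python/engine.py | extract_bomb_timing_from_tick_map
-- ===== SOURCE A (Python) =====
-- import math
--
-- def _to_int_or_none(value):
--     try:
--         return int(value)
--     except Exception:
--         return None
--
-- def _to_float_or_none(value):
--     try:
--         number = float(value)
--         if not math.isfinite(number):
--             return None
--         return number
--     except Exception:
--         return None
--
-- def _to_string_or_default(value, default=""):
--     if isinstance(value, str):
--         stripped = value.strip()
--         return stripped if stripped else default
--
--     parsed_number = _to_float_or_none(value)
--     if parsed_number is None:
--         return default
--
--     return str(parsed_number)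
--
-- def extract_bomb_timing_from_tick_map(events_by_tick, start_tick=None, end_tick=None):
--     if not isinstance(events_by_tick, dict) or not events_by_tick:
--         return None, None, None
--
--     frames = []
--     for tick_value in sorted(events_by_tick.keys()):
--         if start_tick is not None and tick_value < start_tick:
--             continue
--         if end_tick is not None and tick_value > end_tick:
--             continue
--         frames.append(
--             {
--                 "tick": int(tick_value),
--                 "bomb_events": events_by_tick.get(tick_value) or [],
--             }
--         )
--
--     return extract_bomb_timing_from_frames(frames)
--
-- def extract_bomb_timing_from_frames(frames):
--     bomb_planted_tick = None
--     bomb_defused_tick = None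
--     bomb_exploded_tick = None
--
--     if not isinstance(frames, list):
--         return bomb_planted_tick, bomb_defused_tick, bomb_exploded_tick
--
--     for frame in frames:
--         frame_tick = _to_int_or_none(frame.get("tick")) if isinstance(frame, dict) else None
--         if not isinstance(frame, dict):
--             continue
--
--         for event in frame.get("bomb_events") or []:
--             if not isinstance(event, dict):
--                 continue
--             event_type = _to_string_or_default(event.get("event_type"), "").lower()
--             event_tick = _to_int_or_none(event.get("tick"))
--             if event_tick is None:
--                 event_tick = frame_tick
--             if event_tick is None:
--                 continue
--
--             if event_type == "bomb_planted":
--                 if bomb_planted_tick is None or event_tick < bomb_planted_tick: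
--                     bomb_planted_tick = event_tick
--             elif event_type == "bomb_defused":
--                 if bomb_defused_tick is None or event_tick < bomb_defused_tick:
--                     bomb_defused_tick = event_tick
--             elif event_type == "bomb_exploded":
--                 if bomb_exploded_tick is None or event_tick < bomb_exploded_tick:
--                     bomb_exploded_tick = event_tick
--
--     return bomb_planted_tick, bomb_defused_tick, bomb_exploded_tick
-- ===== SOURCE B (Python) =====
-- def _event_type_of(event):
--     raw = event.get("event_type")
--     if isinstance(raw, str):
--         stripped = raw.strip()
--         if stripped:
--             return stripped.lower()
--     return ""
--
-- def _event_tick_of(event, frame_tick):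
--     raw = event.get("tick")
--     try:
--         return int(raw)
--     except Exception:
--         return frame_tick
--
-- def extract_bomb_timing_from_tick_map(events_by_tick, start_tick=None, end_tick=None):
--     if not isinstance(events_by_tick, dict):
--         return None, None, None
--     hits = []
--     for tick_value in sorted(events_by_tick.keys()):
--         if start_tick is not None and tick_value < start_tick:
--             continue
--         if end_tick is not None and tick_value > end_tick:
--             continue
--         for event in events_by_tick[tick_value] or []:
--             if isinstance(event, dict):
--                 hits.append((_event_type_of(event), _event_tick_of(event, int(tick_value))))
--
--     def earliest(kind):
--         ticks = [t for k, t in hits if k == kind]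
--         return min(ticks) if ticks else None
--
--     return earliest("bomb_planted"), earliest("bomb_defused"), earliest("bomb_exploded")
-- ===== Notes on version B (the rewrite author's own statement) =====
-- stated objective: simpler
-- what changed: Replaces A's frames-dict intermediate plus a single fold with three min-accumulators by a two-phase shape: one pass collects (event_type, tick) pairs into a flat table, then each result is min of the matching ticks (or None), dropping the frames structure and the accumulator branching.
import Mathlib
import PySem

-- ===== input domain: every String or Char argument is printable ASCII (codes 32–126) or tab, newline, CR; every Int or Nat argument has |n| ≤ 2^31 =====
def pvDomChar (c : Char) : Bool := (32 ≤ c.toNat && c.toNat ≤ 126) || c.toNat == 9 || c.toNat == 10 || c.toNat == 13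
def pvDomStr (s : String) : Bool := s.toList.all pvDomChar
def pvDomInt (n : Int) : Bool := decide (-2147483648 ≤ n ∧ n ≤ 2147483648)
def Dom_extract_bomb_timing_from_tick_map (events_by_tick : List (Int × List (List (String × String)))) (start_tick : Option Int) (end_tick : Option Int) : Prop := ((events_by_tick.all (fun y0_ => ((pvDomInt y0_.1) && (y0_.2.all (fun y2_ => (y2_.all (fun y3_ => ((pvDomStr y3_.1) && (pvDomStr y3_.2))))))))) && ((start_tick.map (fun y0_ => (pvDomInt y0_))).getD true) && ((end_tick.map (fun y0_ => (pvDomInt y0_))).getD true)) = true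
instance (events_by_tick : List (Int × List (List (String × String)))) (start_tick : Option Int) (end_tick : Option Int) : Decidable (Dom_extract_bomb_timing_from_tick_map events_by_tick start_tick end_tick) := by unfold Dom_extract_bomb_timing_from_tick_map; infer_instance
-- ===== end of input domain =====

-- B re-decomposes A: one pass collects (event_type, tick) pairs into a flat table, then each
-- result is the min of the matching ticks (or none); same return value, no frames intermediate.

-- ===== PORT A =====
-- _to_int_or_none on an event's "tick" value: present string s → int(s), absent (None) → None
def pvToIntOrNone (value : Option String) : Option Int :=
  match value with
  | none => none
  | some s => PySem.Int.ofStr? s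

-- _to_string_or_default(value, "") for a str-or-missing value: missing (None) is not a str and
-- float(None) raises, so the default "" is returned; a string is stripped, "" if empty.
def pvToStringOrDefault (value : Option String) : String :=
  match value with
  | none => ""
  | some s =>
    let stripped := PySem.Str.strip s
    if stripped = "" then "" else stripped

-- 'if acc is None or t < acc: acc = t'
def pvMinStep (acc : Option Int) (t : Int) : Option Int :=
  match acc with
  | none => some t
  | some p => if t < p then some t else some p

def extract_bomb_timing_from_frames (frames : List (Int × List (List (String × String)))) :
    Option Int × Option Int × Option Int :=
  frames.foldl
    (fun acc frame =>
      let frame_tick : Option Int := some frame.1  -- _to_int_or_none(frame["tick"]) on an int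
      frame.2.foldl
        (fun acc event0 =>
          let event := PySem.Dict.ofList event0
          let event_type := PySem.Str.lower (pvToStringOrDefault (PySem.Dict.get? event "event_type"))
          let event_tick : Option Int :=
            match pvToIntOrNone (PySem.Dict.get? event "tick") with
            | none => frame_tick
            | some t => some t
          match event_tick with
          | none => acc
          | some t =>
            if event_type = "bomb_planted" then (pvMinStep acc.1 t, acc.2.1, acc.2.2)
            else if event_type = "bomb_defused" then (acc.1, pvMinStep acc.2.1 t, acc.2.2)
            else if event_type = "bomb_exploded" then (acc.1, acc.2.1, pvMinStep acc.2.2 t)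
            else acc)
        acc)
    (none, none, none)

def extract_bomb_timing_from_tick_map (events_by_tick : List (Int × List (List (String × String)))) (start_tick : Option Int) (end_tick : Option Int) : Option Int × Option Int × Option Int :=
  if PySem.Dict.size (PySem.Dict.ofList events_by_tick) = 0 then (none, none, none)
  else
    extract_bomb_timing_from_frames
      ((PySem.List.sorted (PySem.Dict.keys (PySem.Dict.ofList events_by_tick)) (fun x => x) false).foldl
        (fun acc tick_value =>
          if (match start_tick with | some s => decide (tick_value < s) | none => false) then acc
          else if (match end_tick with | some e => decide (e < tick_value) | none => false) then acc
          else acc ++ [(tick_value, PySem.Dict.getD (PySem.Dict.ofList events_by_tick) tick_value [])])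
        [])

-- ===== PORT B =====
def pvAltEventType (event : PySem.Dict String String) : String :=
  match PySem.Dict.get? event "event_type" with
  | some s =>
    let stripped := PySem.Str.strip s
    if stripped = "" then "" else PySem.Str.lower stripped
  | none => ""

def pvAltEventTick (event : PySem.Dict String String) (frame_tick : Int) : Int :=
  match PySem.Dict.get? event "tick" with
  | some s =>
    match PySem.Int.ofStr? s with
    | some n => n
    | none => frame_tick
  | none => frame_tick

def pvEarliest (hits : List (String × Int)) (kind : String) : Option Int :=
  PySem.List.min? ((hits.filter (fun p => p.1 == kind)).map (fun p => p.2)) (fun t => t)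

-- the three 'earliest(kind)' reductions over the collected table
def pvEarliest3 (hits : List (String × Int)) : Option Int × Option Int × Option Int :=
  (pvEarliest hits "bomb_planted", pvEarliest hits "bomb_defused", pvEarliest hits "bomb_exploded")

def extract_bomb_timing_from_tick_map_alt (events_by_tick : List (Int × List (List (String × String)))) (start_tick : Option Int) (end_tick : Option Int) : Option Int × Option Int × Option Int :=
  pvEarliest3
    ((PySem.List.sorted (PySem.Dict.keys (PySem.Dict.ofList events_by_tick)) (fun x => x) false).foldl
      (fun acc tick_value =>
        if (match start_tick with | some s => decide (tick_value < s) | none => false) then acc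
        else if (match end_tick with | some e => decide (e < tick_value) | none => false) then acc
        else acc ++ (PySem.Dict.getD (PySem.Dict.ofList events_by_tick) tick_value []).map (fun event0 =>
          (pvAltEventType (PySem.Dict.ofList event0), pvAltEventTick (PySem.Dict.ofList event0) tick_value)))
      [])

-- ===== PRECONDITION & SPEC =====
def Spec_extract_bomb_timing_from_tick_map (events_by_tick : List (Int × List (List (String × String)))) (start_tick : Option Int) (end_tick : Option Int) (out : Option Int × Option Int × Option Int) : Prop := out = extract_bomb_timing_from_tick_map_alt events_by_tick start_tick end_tick
instance (events_by_tick : List (Int × List (List (String × String)))) (start_tick : Option Int) (end_tick : Option Int) (out : Option Int × Option Int × Option Int) : Decidable (Spec_extract_bomb_timing_from_tick_map events_by_tick start_tick end_tick out) := by unfold Spec_extract_bomb_timing_from_tick_map; infer_instance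

-- ===== CLAIM (what is proved, stated in full; the proofs are below) =====
def Claim_equal_extract_bomb_timing_from_tick_map : Prop := ∀ (events_by_tick : List (Int × List (List (String × String)))) (start_tick : Option Int) (end_tick : Option Int), Dom_extract_bomb_timing_from_tick_map events_by_tick start_tick end_tick → Spec_extract_bomb_timing_from_tick_map events_by_tick start_tick end_tick (extract_bomb_timing_from_tick_map events_by_tick start_tick end_tick)

-- ===== LEMMAS AND PROOFS =====

-- the shared tick filter of both Pythons, as one Bool
def pvKeep (start_tick end_tick : Option Int) (tv : Int) : Bool :=
  !(match start_tick with | some s => decide (tv < s) | none => false) &&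
  !(match end_tick with | some e => decide (e < tv) | none => false)

-- the (event_type, resolved tick) pair A's inner loop works from
def pvResolve (tv : Int) (event0 : List (String × String)) : String × Int :=
  let event := PySem.Dict.ofList event0
  (PySem.Str.lower (pvToStringOrDefault (PySem.Dict.get? event "event_type")),
   (pvToIntOrNone (PySem.Dict.get? event "tick")).getD tv)

-- A's three-accumulator update, on a resolved pair
def pvStepH (acc : Option Int × Option Int × Option Int) (q : String × Int) :
    Option Int × Option Int × Option Int :=
  if q.1 = "bomb_planted" then (pvMinStep acc.1 q.2, acc.2.1, acc.2.2)
  else if q.1 = "bomb_defused" then (acc.1, pvMinStep acc.2.1 q.2, acc.2.2)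
  else if q.1 = "bomb_exploded" then (acc.1, acc.2.1, pvMinStep acc.2.2 q.2)
  else acc

theorem pv_skip_if {α : Type} (b1 b2 : Bool) (acc y : List α) :
    (if b1 then acc else if b2 then acc else acc ++ y) =
      (if (!b1 && !b2) then acc ++ y else acc) := by
  cases b1 <;> cases b2 <;> simp

theorem pv_type_alt (event : PySem.Dict String String) :
    PySem.Str.lower (pvToStringOrDefault (PySem.Dict.get? event "event_type")) =
      pvAltEventType event := by
  unfold pvToStringOrDefault pvAltEventType
  cases hT : PySem.Dict.get? event "event_type" with
  | none => rfl
  | some s =>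
    by_cases h : PySem.Str.strip s = "" <;> simp [h, show PySem.Str.lower "" = "" from rfl]

theorem pv_tick_alt (event : PySem.Dict String String) (tv : Int) :
    (pvToIntOrNone (PySem.Dict.get? event "tick")).getD tv = pvAltEventTick event tv := by
  unfold pvToIntOrNone pvAltEventTick
  cases hK : PySem.Dict.get? event "tick" with
  | none => rfl
  | some s => cases hO : PySem.Int.ofStr? s <;> simp [hO]

theorem pv_resolve_alt (tv : Int) (event0 : List (String × String)) :
    pvResolve tv event0 =
      (pvAltEventType (PySem.Dict.ofList event0), pvAltEventTick (PySem.Dict.ofList event0) tv) := by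
  simp only [pvResolve]
  rw [pv_type_alt, pv_tick_alt]

theorem pv_frames_eq_stream (frames : List (Int × List (List (String × String)))) :
    extract_bomb_timing_from_frames frames =
      (frames.flatMap (fun f => f.2.map (pvResolve f.1))).foldl pvStepH (none, none, none) := by
  rw [List.foldl_flatMap]
  unfold extract_bomb_timing_from_frames
  apply PySem.List.foldl_congr_mem
  intro acc f _
  rw [List.foldl_map]
  apply PySem.List.foldl_congr_mem
  intro acc2 e _
  simp only [pvResolve, pvStepH]
  cases h : pvToIntOrNone (PySem.Dict.get? (PySem.Dict.ofList e) "tick") <;> simp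

theorem pv_foldl_minStep_some (t : List Int) (a : Int) :
    t.foldl pvMinStep (some a) = some (t.foldl min a) := by
  induction t generalizing a with
  | nil => rfl
  | cons x s ih =>
    simp only [List.foldl_cons]
    have h : pvMinStep (some a) x = some (min a x) := by
      unfold pvMinStep
      rcases lt_or_ge x a with h | h
      · simp [h, min_eq_right h.le]
      · simp [not_lt.mpr h, min_eq_left h]
    rw [h, ih]

theorem pv_foldl_minStep_none (l : List Int) :
    l.foldl pvMinStep none = PySem.List.min? l (fun t => t) := by
  cases l with
  | nil => rfl
  | cons x t =>
    have h0 : pvMinStep none x = some x := rfl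
    rw [List.foldl_cons, h0, pv_foldl_minStep_some, PySem.List.min?_id_cons]

theorem pv_stream_foldl (s : List (String × Int)) :
    ∀ p d e : Option Int,
      s.foldl pvStepH (p, d, e) =
        (((s.filter (fun q => q.1 == "bomb_planted")).map (fun q => q.2)).foldl pvMinStep p,
         ((s.filter (fun q => q.1 == "bomb_defused")).map (fun q => q.2)).foldl pvMinStep d,
         ((s.filter (fun q => q.1 == "bomb_exploded")).map (fun q => q.2)).foldl pvMinStep e) := by
  induction s with
  | nil => intro p d e; rfl
  | cons q s ih =>
    intro p d e
    obtain ⟨et, t⟩ := q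
    by_cases h1 : et = "bomb_planted"
    · simp [pvStepH, h1, ih]
    · by_cases h2 : et = "bomb_defused"
      · simp [pvStepH, h2, ih]
      · by_cases h3 : et = "bomb_exploded"
        · simp [pvStepH, h3, ih]
        · simp [pvStepH, h1, h2, h3, ih]

theorem pv_filter_fold {β : Type} (st en : Option Int) (ticks : List Int) (g : Int → List β) :
    ticks.foldl (fun acc tv =>
      if (match st with | some s => decide (tv < s) | none => false) then acc
      else if (match en with | some e => decide (e < tv) | none => false) then acc
      else acc ++ g tv) [] = (ticks.filter (pvKeep st en)).flatMap g := by
  have h1 : ∀ (acc : List β) (tv : Int), tv ∈ ticks →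
      (if (match st with | some s => decide (tv < s) | none => false) then acc
       else if (match en with | some e => decide (e < tv) | none => false) then acc
       else acc ++ g tv)
      = (if pvKeep st en tv then acc ++ g tv else acc) := fun acc tv _ => by rw [pv_skip_if]; rfl
  rw [PySem.List.foldl_congr_mem ticks _ _ [] h1, PySem.List.foldl_if_eq_foldl_filter, PySem.List.foldl_append_eq_flatMap]
  simp

-- ===== VERDICT (by name: the statement is the Claim_ definition above) =====
theorem extract_bomb_timing_from_tick_map_spec : Claim_equal_extract_bomb_timing_from_tick_map := by
  intro ev st en _
  unfold Spec_extract_bomb_timing_from_tick_map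
  by_cases hsz : PySem.Dict.size (PySem.Dict.ofList ev) = 0
  · have hkeys : PySem.Dict.keys (PySem.Dict.ofList ev) = [] := by
      have hitems : (PySem.Dict.ofList ev).items = [] := List.eq_nil_of_length_eq_zero hsz
      simp only [PySem.Dict.keys, hitems, List.map_nil]
    unfold extract_bomb_timing_from_tick_map extract_bomb_timing_from_tick_map_alt
    rw [if_pos hsz, hkeys]
    rfl
  · unfold extract_bomb_timing_from_tick_map extract_bomb_timing_from_tick_map_alt
    rw [if_neg hsz]
    rw [pv_filter_fold, pv_filter_fold, pv_frames_eq_stream]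
    rw [← List.map_eq_flatMap, List.flatMap_map]
    have hres : ∀ tv : Int, pvResolve tv = fun event0 =>
        (pvAltEventType (PySem.Dict.ofList event0), pvAltEventTick (PySem.Dict.ofList event0) tv) :=
      fun tv => funext (pv_resolve_alt tv)
    simp only [hres]
    rw [pv_stream_foldl]
    simp only [pvEarliest3, pvEarliest, ← pv_foldl_minStep_none]
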